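-- pv_equiv track=rewrite | github.com/devansh5/DSA | Arrays/immediatesmallerx.py | immediatesmalllerx
-- ===== SOURCE A (Python) =====
-- def immediatesmalllerx(arr,n,x):
--     flag=False
--     for i in range(n-1,-1,-1):
--         if arr[i]<x:
--             flag=True
--             return arr[i]
--             break
--         else:
--             flag=False
--
--     if flag==False:
--         return -1
-- ===== SOURCE B (Python) =====
-- def immediatesmalllerx(arr, n, x):
--     smaller = [v for v in arr[:max(0, n)] if v < x]
--     return smaller[-1] if smaller else -1
-- ===== Notes on version B (the rewrite author's own statement) =====
-- stated objective: simpler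
-- what changed: A's backward indexed scan with an early return is replaced by a staged pipeline: filter the first-n prefix for elements smaller than x with a comprehension, then return the last element of the filtered list (or -1).
import Mathlib
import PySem

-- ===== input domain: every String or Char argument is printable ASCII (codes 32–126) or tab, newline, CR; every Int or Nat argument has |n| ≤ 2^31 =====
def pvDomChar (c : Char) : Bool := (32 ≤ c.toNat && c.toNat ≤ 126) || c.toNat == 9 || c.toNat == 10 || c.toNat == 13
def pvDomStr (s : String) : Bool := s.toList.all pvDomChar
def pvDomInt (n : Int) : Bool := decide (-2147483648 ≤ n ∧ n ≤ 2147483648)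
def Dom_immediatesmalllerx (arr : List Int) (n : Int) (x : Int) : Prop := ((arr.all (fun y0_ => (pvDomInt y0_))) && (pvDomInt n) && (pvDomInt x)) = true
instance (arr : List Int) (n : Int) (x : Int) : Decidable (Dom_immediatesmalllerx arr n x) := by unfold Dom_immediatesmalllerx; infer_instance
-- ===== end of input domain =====

-- B replaces A's backward indexed scan with early return by a staged pipeline
-- (filter the first-n prefix, take the last kept element); objective: simpler.

-- ===== PORT A =====
-- backward loop 'for i in range(n-1,-1,-1)': return arr[i] at the first i with
-- arr[i] < x; none = IndexError (excluded by Pre_); falls through to -1.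
def pvGoA (arr : List Int) (x : Int) : List Int → Option Int
  | [] => some (-1)
  | i :: rest =>
    match PySem.List.pyGet? arr i with
    | none => none
    | some v => if v < x then some v else pvGoA arr x rest

def immediatesmalllerx (arr : List Int) (n : Int) (x : Int) : Int :=
  (pvGoA arr x (PySem.List.pyRange (n - 1) (-1) (-1))).getD (-1)

-- ===== PORT B =====
-- 'smaller = [v for v in arr[:max(0, n)] if v < x]; return smaller[-1] if smaller else -1'
def pvLastOr (smaller : List Int) : Int :=
  match smaller with
  | [] => -1
  | _ => (PySem.List.pyGet? smaller (-1)).getD (-1)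

def immediatesmalllerx_alt (arr : List Int) (n : Int) (x : Int) : Int :=
  pvLastOr ((PySem.List.slice arr none (some (max 0 n))).filter (fun v => decide (v < x)))

-- ===== PRECONDITION & SPEC =====
-- A indexes arr[n-1] … arr[0]; it raises IndexError exactly when n > len(arr).
def Pre_immediatesmalllerx (arr : List Int) (n : Int) (x : Int) : Prop := n ≤ (arr.length : Int)
instance (arr : List Int) (n : Int) (x : Int) : Decidable (Pre_immediatesmalllerx arr n x) := by unfold Pre_immediatesmalllerx; infer_instance
def pvWitness_immediatesmalllerx : List Int × Int × Int := ([3, 1, 4], 3, 2)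

def Spec_immediatesmalllerx (arr : List Int) (n : Int) (x : Int) (out : Int) : Prop := out = immediatesmalllerx_alt arr n x
instance (arr : List Int) (n : Int) (x : Int) (out : Int) : Decidable (Spec_immediatesmalllerx arr n x out) := by unfold Spec_immediatesmalllerx; infer_instance

-- ===== CLAIM (what is proved, stated in full; the proofs are below) =====
def Claim_equal_immediatesmalllerx : Prop := ∀ (arr : List Int) (n : Int) (x : Int), Dom_immediatesmalllerx arr n x → Pre_immediatesmalllerx arr n x → Spec_immediatesmalllerx arr n x (immediatesmalllerx arr n x)

-- ===== LEMMAS AND PROOFS =====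

-- B's pipeline, written as take/filter/getLast?.
theorem alt_eq (arr : List Int) (n : Int) (x : Int) :
    immediatesmalllerx_alt arr n x
      = (((arr.take (max 0 n).toNat).filter (fun v => decide (v < x))).getLast?).getD (-1) := by
  unfold immediatesmalllerx_alt
  rw [PySem.List.slice_to arr (le_max_left 0 n)]
  cases h : (arr.take (max 0 n).toNat).filter (fun v => decide (v < x)) with
  | nil => rfl
  | cons a t =>
    show (PySem.List.pyGet? (a :: t) (-1)).getD (-1) = (a :: t).getLast?.getD (-1)
    simp only [PySem.List.pyGet?_neg_one]

-- A's backward scan returns the last element of the first-n prefix below x (or -1).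
theorem pvMain (arr : List Int) (x : Int) :
    ∀ (m : Nat) (n : Int), n.toNat = m → n ≤ (arr.length : Int) →
      pvGoA arr x (PySem.List.pyRange (n - 1) (-1) (-1))
        = some ((((arr.take n.toNat).filter (fun v => decide (v < x))).getLast?).getD (-1)) := by
  intro m
  induction m with
  | zero =>
    intro n hm hle
    rw [PySem.List.pyRange_neg_one_eq_nil (by omega), hm]
    simp [pvGoA]
  | succ k ih =>
    intro n hm hle
    have hlt : (n - 1).toNat < arr.length := by omega
    rw [PySem.List.pyRange_neg_one_cons (by omega : (-1:Int) < n - 1)]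
    have hget := PySem.List.pyGet?_eq_some_getElem (xs := arr) (i := n - 1)
      (by omega) (by exact_mod_cast (by omega : n - 1 < (arr.length : Int)))
    have htake : arr.take n.toNat = arr.take (n - 1).toNat ++ [arr[(n - 1).toNat]] := by
      have hnn : n.toNat = (n - 1).toNat + 1 := by omega
      rw [hnn, List.take_add_one, List.getElem?_eq_getElem hlt]
      rfl
    simp only [pvGoA, hget]
    rw [htake, List.filter_append]
    generalize arr[(n - 1).toNat] = a
    by_cases hv : a < x
    · rw [if_pos hv, show List.filter (fun v => decide (v < x)) [a] = [a] from by simp [hv],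
        List.getLast?_concat]
      rfl
    · rw [if_neg hv, show List.filter (fun v => decide (v < x)) [a] = [] from by simp [hv],
        List.append_nil, ih (n - 1) (by omega) (by omega)]

-- ===== VERDICT (by name: the statement is the Claim_ definition above) =====
theorem immediatesmalllerx_spec : Claim_equal_immediatesmalllerx := by
  intro arr n x _ hpre
  unfold Spec_immediatesmalllerx immediatesmalllerx
  rw [alt_eq, pvMain arr x n.toNat n rfl hpre]
  have : (max 0 n).toNat = n.toNat := by omega
  rw [this]
  rfl
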